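-- pv_equiv track=rewrite | github.com/ruiniao/codility-coding-lessons | 6-sorting.py | NumberOfDiscIntersections0
-- ===== SOURCE A (Python) =====
-- def NumberOfDiscIntersections0(A):
--     # write your code in Python 3.6
--     range_x = []
--     n = len(A)
--     count = 0
--     if n == 0 :
--         return 0
--     if n > 100000:
--         return -1
--     for i in range(n):
--         x = [i-A[i], i+A[i]]
--         range_x.append(x)
--     for i in range(len(range_x)-1):
--         for j in range(i+1, len(range_x)):
--             if intersect(range_x[i], range_x[j]) == True:
--                 count += 1
--     if count > 10000000:
--         return -1
--     return count
--
-- def intersect(x, y):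
--     if (x[1] < y[0]) or (x[0] > y[1]):
--         return False
--     else:
--         return True
-- ===== SOURCE B (Python) =====
-- def _bisect_left(a, x):
--     lo = 0
--     hi = len(a)
--     while lo < hi:
--         mid = (lo + hi) // 2
--         if a[mid] < x:
--             lo = mid + 1
--         else:
--             hi = mid
--     return lo
--
-- def NumberOfDiscIntersections0(A):
--     # sweep left to right; 'ends' holds the right endpoints i+A[i] of the discs
--     # seen so far, kept sorted; disc j intersects exactly those with end >= j-A[j]
--     n = len(A)
--     if n == 0:
--         return 0
--     if n > 100000:
--         return -1
--     count = 0
--     ends = []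
--     for j in range(n):
--         a = A[j]
--         count += len(ends) - _bisect_left(ends, j - a)
--         ends.insert(_bisect_left(ends, j + a), j + a)
--     if count > 10000000:
--         return -1
--     return count
-- ===== Notes on version B (the rewrite author's own statement) =====
-- stated objective: faster
-- what changed: Replaces the O(n^2) all-pairs intersect test by a left-to-right sweep that keeps the right endpoints i+A[i] seen so far in a sorted list and, for each disc j, binary-searches how many of them are >= j-A[j] (valid for any integer A[j] since for i<j the pair intersects iff j-A[j] <= i+A[i]).
import Mathlib
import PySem

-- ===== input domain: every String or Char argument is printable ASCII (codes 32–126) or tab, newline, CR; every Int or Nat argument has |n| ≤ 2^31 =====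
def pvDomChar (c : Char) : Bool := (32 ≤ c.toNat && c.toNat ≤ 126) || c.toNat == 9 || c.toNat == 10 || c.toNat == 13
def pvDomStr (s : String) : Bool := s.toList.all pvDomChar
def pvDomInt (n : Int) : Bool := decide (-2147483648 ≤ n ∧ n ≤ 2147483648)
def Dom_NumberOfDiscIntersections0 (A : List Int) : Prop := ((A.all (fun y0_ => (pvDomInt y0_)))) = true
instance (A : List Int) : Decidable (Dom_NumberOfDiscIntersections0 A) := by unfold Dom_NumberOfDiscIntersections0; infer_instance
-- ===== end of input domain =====

-- B replaces A's all-pairs intersect test by a sweep that keeps the right endpoints seen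
-- so far in a sorted list and binary-searches how many are ≥ j - A[j] for each disc j.

-- ===== PORT A =====
def pvIntersect (x y : Int × Int) : Bool :=
  if x.2 < y.1 ∨ x.1 > y.2 then false else true

def NumberOfDiscIntersections0 (A : List Int) : Int :=
  let n : Int := (A.length : Int)
  if n = 0 then 0
  else if n > 100000 then (-1)
  else
    let range_x : List (Int × Int) :=
      (PySem.List.pyRange 0 n 1).foldl
        (fun acc i => acc ++ [(i - PySem.List.pyGetD A i 0, i + PySem.List.pyGetD A i 0)]) []
    let count : Int :=
      (PySem.List.pyRange 0 ((range_x.length : Int) - 1) 1).foldl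
        (fun c i =>
          (PySem.List.pyRange (i + 1) ((range_x.length : Int)) 1).foldl
            (fun c j =>
              if pvIntersect (PySem.List.pyGetD range_x i (0, 0)) (PySem.List.pyGetD range_x j (0, 0)) = true
              then c + 1 else c) c) 0
    if count > 10000000 then (-1) else count

-- ===== PORT B =====
-- Source B's hand-written _bisect_left is the classic lo/hi halving loop of bisect.bisect_left,
-- which is exactly PySem.List.bisectLeft (same loop, mid = (lo+hi)//2)
def NumberOfDiscIntersections0_alt (A : List Int) : Int :=
  let n : Int := (A.length : Int)
  if n = 0 then 0
  else if n > 100000 then (-1)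
  else
    let st : Int × List Int :=
      (PySem.List.pyRange 0 n 1).foldl
        (fun st j =>
          let a := PySem.List.pyGetD A j 0
          (st.1 + ((st.2.length : Int) - (PySem.List.bisectLeft st.2 (j - a) : Int)),
           PySem.List.insert st.2 ((PySem.List.bisectLeft st.2 (j + a) : Int)) (j + a)))
        (0, [])
    if st.1 > 10000000 then (-1) else st.1

-- ===== PRECONDITION & SPEC =====
def Spec_NumberOfDiscIntersections0 (A : List Int) (out : Int) : Prop := out = NumberOfDiscIntersections0_alt A
instance (A : List Int) (out : Int) : Decidable (Spec_NumberOfDiscIntersections0 A out) := by unfold Spec_NumberOfDiscIntersections0; infer_instance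

-- ===== CLAIM (what is proved, stated in full; the proofs are below) =====
def Claim_equal_NumberOfDiscIntersections0 : Prop := ∀ (A : List Int), Dom_NumberOfDiscIntersections0 A → Spec_NumberOfDiscIntersections0 A (NumberOfDiscIntersections0 A)

-- ===== LEMMAS AND PROOFS =====

-- bisect_left on a sorted list counts the elements strictly below the probe
lemma pv_bisect_eq_countP (e : List Int) (v : Int) (h : e.Pairwise (· ≤ ·)) :
    PySem.List.bisectLeft e v = e.countP (fun t => decide (t < v)) := by
  obtain ⟨hle, hlt, hge⟩ := PySem.List.bisectLeft_spec e v h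
  set k := PySem.List.bisectLeft e v with hk
  conv_rhs => rw [← List.take_append_drop k e, List.countP_append]
  have h1 : (e.take k).countP (fun t => decide (t < v)) = (e.take k).length := by
    rw [List.countP_eq_length]
    intro a ha
    obtain ⟨i, hi, rfl⟩ := List.mem_iff_getElem.mp ha
    rw [List.getElem_take]
    simp only [decide_eq_true_iff]
    exact hlt i (by simp at hi; omega) (by simp at hi; omega)
  have h2 : (e.drop k).countP (fun t => decide (t < v)) = 0 := by
    rw [List.countP_eq_zero]
    intro a ha
    obtain ⟨i, hi, rfl⟩ := List.mem_iff_getElem.mp ha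
    rw [List.getElem_drop]
    simp only [decide_eq_true_iff, not_lt]
    exact hge (k + i) (by simp at hi; omega) (by omega)
  rw [h1, h2, List.length_take]
  omega

-- inserting at the bisect_left position keeps the list sorted and adds the element
lemma pv_insert_sorted (e : List Int) (v : Int) (h : e.Pairwise (· ≤ ·)) :
    (PySem.List.insert e ((PySem.List.bisectLeft e v : Nat) : Int) v).Pairwise (· ≤ ·) ∧
    (PySem.List.insert e ((PySem.List.bisectLeft e v : Nat) : Int) v).Perm (v :: e) := by
  obtain ⟨hle, hlt, hge⟩ := PySem.List.bisectLeft_spec e v h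
  set k := PySem.List.bisectLeft e v with hk
  rw [PySem.List.insert_natCast e k v hle]
  constructor
  · rw [List.pairwise_append]
    refine ⟨h.sublist (List.take_sublist k e), ?_, ?_⟩
    · rw [List.pairwise_cons]
      refine ⟨?_, h.sublist (List.drop_sublist k e)⟩
      intro b hb
      obtain ⟨i, hi, rfl⟩ := List.mem_iff_getElem.mp hb
      rw [List.getElem_drop]
      exact hge (k + i) (by simp at hi; omega) (by omega)
    · intro a ha b hb
      obtain ⟨i, hi, rfl⟩ := List.mem_iff_getElem.mp ha
      have hil : i < e.length := by simp at hi; omega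
      rw [List.getElem_take]
      have hav : e[i] < v := hlt i (by simp at hi; omega) (by simp at hi; omega)
      rcases List.mem_cons.mp hb with rfl | hb
      · exact le_of_lt hav
      · obtain ⟨j, hj, rfl⟩ := List.mem_iff_getElem.mp hb
        have hjl : k + j < e.length := by simp at hj; omega
        rw [List.getElem_drop]
        have := hge (k + j) (by simp at hj; omega) (by omega)
        omega
  · calc (List.take k e ++ v :: List.drop k e).Perm (v :: (List.take k e ++ List.drop k e)) := List.perm_middle
      _ = v :: e := by rw [List.take_append_drop]

-- the right endpoints of the first |A| discs
def pvEnds (A : List Int) : List Int :=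
  (PySem.List.pyRange 0 (A.length : Int) 1).map (fun i => i + PySem.List.pyGetD A i 0)

-- number of discs i < j intersecting disc j
def pvCntAt (A : List Int) (j : Int) : Nat :=
  (PySem.List.pyRange 0 j 1).countP
    (fun i => decide (j - PySem.List.pyGetD A j 0 ≤ i + PySem.List.pyGetD A i 0))

def pvBSum (A : List Int) : Int :=
  ((PySem.List.pyRange 0 (A.length : Int) 1).map (fun j => (pvCntAt A j : Int))).sum

-- B's loop body, named for the induction
def pvStep (A : List Int) (st : Int × List Int) (j : Int) : Int × List Int :=
  let a := PySem.List.pyGetD A j 0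
  (st.1 + ((st.2.length : Int) - (PySem.List.bisectLeft st.2 (j - a) : Int)),
   PySem.List.insert st.2 ((PySem.List.bisectLeft st.2 (j + a) : Int)) (j + a))

-- pyGetD is unchanged on the old prefix
lemma pv_getD_append (xs : List Int) (x : Int) (j : Int) (h0 : 0 ≤ j) (h1 : j < (xs.length : Int)) :
    PySem.List.pyGetD (xs ++ [x]) j 0 = PySem.List.pyGetD xs j 0 := by
  rw [PySem.List.pyGetD_of_nonneg _ _ h0, PySem.List.pyGetD_of_nonneg _ _ h0]
  exact List.getD_append _ _ _ _ (by omega)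

lemma pv_getD_last (xs : List Int) (x : Int) :
    PySem.List.pyGetD (xs ++ [x]) (xs.length : Int) 0 = x := by
  rw [PySem.List.pyGetD_eq_getElem _ _ (by positivity) (by simp)]
  simp

-- the sweep invariant: count so far = per-disc sum, ends sorted and = the endpoints seen
lemma pv_loop (A : List Int) :
    ((PySem.List.pyRange 0 (A.length : Int) 1).foldl (pvStep A) (0, [])).1 = pvBSum A ∧
    ((PySem.List.pyRange 0 (A.length : Int) 1).foldl (pvStep A) (0, [])).2.Pairwise (· ≤ ·) ∧
    ((PySem.List.pyRange 0 (A.length : Int) 1).foldl (pvStep A) (0, [])).2.Perm (pvEnds A) := by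
  induction A using List.reverseRecOn with
  | nil => simp [PySem.List.pyRange_one_eq_nil, pvBSum, pvEnds]
  | append_singleton xs x ih =>
    have hlen : ((xs ++ [x]).length : Int) = (xs.length : Int) + 1 := by simp
    rw [hlen, PySem.List.pyRange_one_succ_right (by positivity), List.foldl_append]
    have hcong : (PySem.List.pyRange 0 (xs.length : Int) 1).foldl (pvStep (xs ++ [x])) (0, [])
        = (PySem.List.pyRange 0 (xs.length : Int) 1).foldl (pvStep xs) (0, []) := by
      apply PySem.List.foldl_congr_mem
      intro st j hj
      rw [PySem.List.mem_pyRange_one] at hj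
      simp only [pvStep, pv_getD_append xs x j hj.1 hj.2]
    rw [hcong]
    obtain ⟨ih1, ih2, ih3⟩ := ih
    set st := (PySem.List.pyRange 0 (xs.length : Int) 1).foldl (pvStep xs) (0, []) with hst
    simp only [List.foldl_cons, List.foldl_nil]
    have hlen2 : st.2.length = xs.length := by
      rw [ih3.length_eq]
      simp [pvEnds, PySem.List.length_pyRange_one]
    have hE : pvEnds (xs ++ [x]) = pvEnds xs ++ [(xs.length : Int) + x] := by
      simp only [pvEnds, hlen]
      rw [PySem.List.pyRange_one_succ_right (by positivity), List.map_append]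
      congr 1
      · apply List.map_congr_left
        intro j hj
        rw [PySem.List.mem_pyRange_one] at hj
        rw [pv_getD_append xs x j hj.1 hj.2]
      · simp
    have hcnt : ((st.2.length : Int) -
          (PySem.List.bisectLeft st.2 ((xs.length : Int) - PySem.List.pyGetD (xs ++ [x]) (xs.length : Int) 0) : Int))
        = (pvCntAt (xs ++ [x]) (xs.length : Int) : Int) := by
      rw [pv_getD_last]
      rw [pv_bisect_eq_countP st.2 _ ih2, ih3.countP_eq]
      have hmap : (pvEnds xs).countP (fun t => decide (t < (xs.length : Int) - x))
          = (PySem.List.pyRange 0 (xs.length : Int) 1).countP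
              (fun i => decide (i + PySem.List.pyGetD xs i 0 < (xs.length : Int) - x)) := by
        rw [pvEnds, List.countP_map]
        rfl
      have hcA : pvCntAt (xs ++ [x]) (xs.length : Int)
          = (PySem.List.pyRange 0 (xs.length : Int) 1).countP
              (fun i => decide ((xs.length : Int) - x ≤ i + PySem.List.pyGetD xs i 0)) := by
        rw [pvCntAt, pv_getD_last]
        apply List.countP_congr
        intro i hi
        rw [PySem.List.mem_pyRange_one] at hi
        rw [pv_getD_append xs x i hi.1 hi.2]
      rw [hmap, hcA, hlen2]
      have htot := List.length_eq_countP_add_countP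
        (fun i => decide (i + PySem.List.pyGetD xs i 0 < (xs.length : Int) - x))
        (l := PySem.List.pyRange 0 (xs.length : Int) 1)
      have hnot : (PySem.List.pyRange 0 (xs.length : Int) 1).countP
            (fun i => decide ¬ ((fun i => decide (i + PySem.List.pyGetD xs i 0 < (xs.length : Int) - x)) i = true))
          = (PySem.List.pyRange 0 (xs.length : Int) 1).countP
              (fun i => decide ((xs.length : Int) - x ≤ i + PySem.List.pyGetD xs i 0)) := by
        apply List.countP_congr
        intro i _
        simp only [decide_eq_true_eq, not_lt]
      rw [hnot] at htot
      have hlr : (PySem.List.pyRange 0 (xs.length : Int) 1).length = xs.length := by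
        simp [PySem.List.length_pyRange_one]
      omega
    have hS : pvBSum (xs ++ [x]) = pvBSum xs + (pvCntAt (xs ++ [x]) (xs.length : Int) : Int) := by
      simp only [pvBSum, hlen]
      rw [PySem.List.pyRange_one_succ_right (by positivity), List.map_append, List.sum_append]
      have h1 : List.map (fun j => (pvCntAt (xs ++ [x]) j : Int)) (PySem.List.pyRange 0 (xs.length : Int) 1)
          = List.map (fun j => (pvCntAt xs j : Int)) (PySem.List.pyRange 0 (xs.length : Int) 1) := by
        apply List.map_congr_left
        intro j hj
        rw [PySem.List.mem_pyRange_one] at hj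
        congr 1
        simp only [pvCntAt]
        rw [pv_getD_append xs x j hj.1 hj.2]
        apply List.countP_congr
        intro i hi
        rw [PySem.List.mem_pyRange_one] at hi
        rw [pv_getD_append xs x i hi.1 (by omega)]
      rw [h1]
      simp
    refine ⟨?_, ?_, ?_⟩
    · simp only [pvStep]
      rw [hcnt, ih1, hS]
    · simp only [pvStep]
      exact (pv_insert_sorted st.2 _ ih2).1
    · simp only [pvStep]
      refine ((pv_insert_sorted st.2 _ ih2).2.trans ?_)
      rw [pv_getD_last, hE]
      exact (List.Perm.cons _ ih3).trans (List.perm_append_singleton _ _).symm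

-- exchanging the two summations of A's nested loops
lemma pv_swap_sum (q : Int → Int → Bool) (n : Nat) :
    ((PySem.List.pyRange 0 ((n : Int) - 1) 1).map
        (fun i => (((PySem.List.pyRange (i + 1) (n : Int) 1).countP (fun j => q i j)) : Int))).sum
    = ((PySem.List.pyRange 0 (n : Int) 1).map
        (fun j => (((PySem.List.pyRange 0 j 1).countP (fun i => q i j)) : Int))).sum := by
  induction n with
  | zero => simp [PySem.List.pyRange_one_eq_nil]
  | succ n ih =>
    have hr : (PySem.List.pyRange 0 ((n : Int) + 1) 1) = PySem.List.pyRange 0 (n : Int) 1 ++ [(n : Int)] :=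
      PySem.List.pyRange_one_succ_right (by positivity)
    push_cast
    rw [hr, List.map_append, List.sum_append]
    rcases Nat.eq_zero_or_pos n with hn0 | hnpos
    · subst hn0; simp [PySem.List.pyRange_one_eq_nil]
    · have hl : ((n : Int) + 1 - 1) = ((n : Int) - 1) + 1 := by ring
      have hl2 : (PySem.List.pyRange 0 (((n : Int) - 1) + 1) 1)
          = PySem.List.pyRange 0 ((n : Int) - 1) 1 ++ [(n : Int) - 1] :=
        PySem.List.pyRange_one_succ_right (by omega)
      rw [hl, hl2, List.map_append, List.sum_append]
      have hinner : ∀ i : Int, i ∈ PySem.List.pyRange 0 ((n : Int) - 1) 1 →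
          ((PySem.List.pyRange (i + 1) ((n : Int) + 1) 1).countP (fun j => q i j) : Int)
          = ((PySem.List.pyRange (i + 1) (n : Int) 1).countP (fun j => q i j) : Int)
            + (if q i (n : Int) = true then 1 else 0) := by
        intro i hi
        rw [PySem.List.mem_pyRange_one] at hi
        rw [PySem.List.pyRange_one_succ_right (by omega), List.countP_append]
        push_cast
        simp [List.countP_cons]
      rw [List.map_congr_left hinner, PySem.List.sum_map_add_int]
      rw [ih]
      have hone : ((PySem.List.pyRange ((n : Int) - 1 + 1) ((n : Int) + 1) 1).countP
            (fun j => q ((n : Int) - 1) j) : Int)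
          = ((PySem.List.pyRange ((n : Int) - 1 + 1) ((n : Int)) 1).countP
            (fun j => q ((n : Int) - 1) j) : Int) + (if q ((n : Int) - 1) (n : Int) = true then 1 else 0) := by
        rw [PySem.List.pyRange_one_succ_right (by omega), List.countP_append]
        push_cast
        simp [List.countP_cons]
      have hsing : PySem.List.pyRange ((n : Int) - 1 + 1) ((n : Int)) 1 = [] :=
        PySem.List.pyRange_one_eq_nil (by omega)
      simp only [List.map_cons, List.map_nil, List.sum_cons, List.sum_nil, hone, hsing]
      have hcnt : ((PySem.List.pyRange 0 (n : Int) 1).countP (fun i => q i (n : Int)) : Int)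
          = ((PySem.List.pyRange 0 ((n : Int) - 1) 1).map
              (fun i => if q i (n : Int) = true then (1 : Int) else 0)).sum
            + (if q ((n : Int) - 1) (n : Int) = true then 1 else 0) := by
        have hsp : (PySem.List.pyRange 0 (n : Int) 1)
            = PySem.List.pyRange 0 ((n : Int) - 1) 1 ++ [(n : Int) - 1] := by
          have := PySem.List.pyRange_one_succ_right (a := 0) (b := (n : Int) - 1) (by omega)
          rw [← this]; congr 1; ring
        rw [hsp, List.countP_append, PySem.List.sum_map_ite_one_zero]
        push_cast
        simp [List.countP_cons]
      rw [hcnt]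
      simp
      ring

-- A's nested loops compute pvBSum
lemma pv_a_count (A : List Int) :
    NumberOfDiscIntersections0 A =
      (if (A.length : Int) = 0 then 0
       else if (A.length : Int) > 100000 then (-1)
       else if pvBSum A > 10000000 then (-1) else pvBSum A) := by
  simp only [NumberOfDiscIntersections0]
  rw [PySem.List.foldl_append_singleton_eq_map
        (f := fun i => (i - PySem.List.pyGetD A i 0, i + PySem.List.pyGetD A i 0))]
  rw [List.nil_append]
  have hlen : ((List.map (fun i => (i - PySem.List.pyGetD A i 0, i + PySem.List.pyGetD A i 0))
      (PySem.List.pyRange 0 (A.length : Int) 1)).length : Int) = (A.length : Int) := by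
    simp [PySem.List.length_pyRange_one]
  rw [hlen]
  have hcount :
      (PySem.List.pyRange 0 ((A.length : Int) - 1) 1).foldl
        (fun c i =>
          (PySem.List.pyRange (i + 1) ((A.length : Int)) 1).foldl
            (fun c j =>
              if pvIntersect
                  (PySem.List.pyGetD (List.map (fun i => (i - PySem.List.pyGetD A i 0, i + PySem.List.pyGetD A i 0)) (PySem.List.pyRange 0 (A.length : Int) 1)) i (0, 0))
                  (PySem.List.pyGetD (List.map (fun i => (i - PySem.List.pyGetD A i 0, i + PySem.List.pyGetD A i 0)) (PySem.List.pyRange 0 (A.length : Int) 1)) j (0, 0)) = true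
              then c + 1 else c) c) 0 = pvBSum A := by
    have hget : ∀ i : Int, 0 ≤ i → i < (A.length : Int) →
        PySem.List.pyGetD (List.map (fun i => (i - PySem.List.pyGetD A i 0, i + PySem.List.pyGetD A i 0)) (PySem.List.pyRange 0 (A.length : Int) 1)) i (0, 0)
        = (i - PySem.List.pyGetD A i 0, i + PySem.List.pyGetD A i 0) := by
      intro i h0 h1
      have hi : i = ((i.toNat : Nat) : Int) := by omega
      rw [hi, PySem.List.pyGetD_map_pyRange _ A.length i.toNat _ (by omega)]
    rw [PySem.List.foldl_congr_mem _ _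
      (fun c i => c + (((PySem.List.pyRange (i + 1) ((A.length : Int)) 1).countP
          (fun j => decide (j - PySem.List.pyGetD A j 0 ≤ i + PySem.List.pyGetD A i 0))) : Int)) _ ?_]
    · rw [PySem.List.foldl_add, zero_add]
      rw [pv_swap_sum (fun i j => decide (j - PySem.List.pyGetD A j 0 ≤ i + PySem.List.pyGetD A i 0)) A.length]
      rfl
    · intro c i hi
      rw [PySem.List.mem_pyRange_one] at hi
      rw [PySem.List.foldl_congr_mem _ _
        (fun c j => if (decide (j - PySem.List.pyGetD A j 0 ≤ i + PySem.List.pyGetD A i 0)) = true then c + 1 else c) _ ?_]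
      · rw [PySem.List.foldl_if_add_one]
      · intro c j hj
        rw [PySem.List.mem_pyRange_one] at hj
        rw [hget i (by omega) (by omega), hget j (by omega) (by omega)]
        have hb : pvIntersect (i - PySem.List.pyGetD A i 0, i + PySem.List.pyGetD A i 0)
            (j - PySem.List.pyGetD A j 0, j + PySem.List.pyGetD A j 0)
            = decide (j - PySem.List.pyGetD A j 0 ≤ i + PySem.List.pyGetD A i 0) := by
          simp only [pvIntersect]
          split_ifs with h
          · have hp : ¬ (j - PySem.List.pyGetD A j 0 ≤ i + PySem.List.pyGetD A i 0) := by omega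
            simp [hp]
          · have hp : j - PySem.List.pyGetD A j 0 ≤ i + PySem.List.pyGetD A i 0 := by omega
            simp [hp]
        rw [hb]
  rw [hcount]

-- B computes pvBSum as well
lemma pv_b_count (A : List Int) :
    NumberOfDiscIntersections0_alt A =
      (if (A.length : Int) = 0 then 0
       else if (A.length : Int) > 100000 then (-1)
       else if pvBSum A > 10000000 then (-1) else pvBSum A) := by
  have h := (pv_loop A).1
  simp only [NumberOfDiscIntersections0_alt]
  rw [show (fun (st : Int × List Int) (j : Int) =>
          let a := PySem.List.pyGetD A j 0
          (st.1 + ((st.2.length : Int) - (PySem.List.bisectLeft st.2 (j - a) : Int)),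
           PySem.List.insert st.2 ((PySem.List.bisectLeft st.2 (j + a) : Int)) (j + a)))
        = pvStep A from rfl, h]

-- ===== VERDICT (by name: the statement is the Claim_ definition above) =====
theorem NumberOfDiscIntersections0_spec : Claim_equal_NumberOfDiscIntersections0 := by
  intro A _
  unfold Spec_NumberOfDiscIntersections0
  rw [pv_a_count, pv_b_count]
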